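-- pv_equiv track=rewrite | github.com/openrewardstandard/python-sdk | tests/test_server.py | _parse_sse
-- ===== SOURCE A (Python) =====
-- def _parse_sse(text: str) -> list[tuple[str, str]]:
--     """Parse SSE text into (event, data) tuples."""
--     events = []
--     current_event = None
--     data_lines = []
--     for line in text.split("\n"):
--         line = line.rstrip("\r")
--         if line.startswith("event:"):
--             current_event = line[len("event:"):].strip()
--         elif line.startswith("data:"):
--             data_lines.append(line[len("data:"):].strip())
--         elif line == "":
--             if current_event:
--                 events.append((current_event, "\n".join(data_lines)))
--             current_event = None
--             data_lines = []
--     if current_event: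
--         events.append((current_event, "\n".join(data_lines)))
--     return events
-- ===== SOURCE B (Python) =====
-- def _parse_sse(text: str) -> list[tuple[str, str]]:
--     """Parse SSE text into (event, data) tuples."""
--     lines = [ln.rstrip("\r") for ln in text.split("\n")]
--     blocks, cur = [], []
--     for ln in lines:
--         if ln == "":
--             blocks.append(cur)
--             cur = []
--         else:
--             cur.append(ln)
--     blocks.append(cur)
--     out = []
--     for block in blocks:
--         event, data = None, []
--         for ln in block:
--             if ln.startswith("event:"):
--                 event = ln[6:].strip()
--             elif ln.startswith("data:"):
--                 data.append(ln[5:].strip())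
--         if event:
--             out.append((event, "\n".join(data)))
--     return out
-- ===== Notes on version B (the rewrite author's own statement) =====
-- stated objective: simpler
-- what changed: Replaced A's single state machine carrying current_event/data_lines across lines (with a duplicated end-of-input flush) by a group-then-parse decomposition: strip trailing carriage returns, split the lines into blocks at empty lines, then parse each block independently and emit its (event, data) pair.
import Mathlib
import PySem

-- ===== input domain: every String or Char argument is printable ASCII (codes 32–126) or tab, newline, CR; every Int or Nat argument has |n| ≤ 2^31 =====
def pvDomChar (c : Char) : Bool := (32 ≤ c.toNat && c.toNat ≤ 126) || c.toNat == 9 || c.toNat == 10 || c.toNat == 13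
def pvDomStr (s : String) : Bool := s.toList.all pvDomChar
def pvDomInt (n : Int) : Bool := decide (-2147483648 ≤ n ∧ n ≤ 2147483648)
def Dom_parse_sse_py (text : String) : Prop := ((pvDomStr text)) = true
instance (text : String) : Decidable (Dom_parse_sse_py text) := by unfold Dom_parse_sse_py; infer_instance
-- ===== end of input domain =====

-- B replaces A's cross-line mutable state machine by a group-then-parse decomposition
-- (split the lines into blocks at empty lines, then parse each block independently);
-- objective: simpler structure, same cost.

-- ===== PORT A =====
-- exact port of str.rstrip("\r"): drop every trailing '\r' (shared string primitive)
def sseRstripCR (l : List Char) : List Char := (l.reverse.dropWhile (fun c => c == '\r')).reverse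

-- one iteration of A's for-loop; state = (events, current_event, data_lines);
-- current_event : Option (List Char), Python truthiness: none and "" are falsy
def sseStepA (st : List (String × String) × Option (List Char) × List (List Char))
    (line0 : List Char) : List (String × String) × Option (List Char) × List (List Char) :=
  let line := sseRstripCR line0
  if PySem.Chars.startswith line "event:".toList then
    (st.1, some (PySem.Chars.strip (line.drop 6)), st.2.2)
  else if PySem.Chars.startswith line "data:".toList then
    (st.1, st.2.1, st.2.2 ++ [PySem.Chars.strip (line.drop 5)])
  else if line = [] then
    (match st.2.1 with
     | some e =>
        if e ≠ [] then
          (st.1 ++ [(String.ofList e, String.ofList (PySem.Chars.join ['\n'] st.2.2))], none, [])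
        else (st.1, none, [])
     | none => (st.1, none, []))
  else st

def parse_sse_py (text : String) : List (String × String) :=
  let st := (PySem.Chars.splitOn text.toList "\n".toList).foldl sseStepA ([], none, [])
  match st.2.1 with
  | some e =>
      if e ≠ [] then st.1 ++ [(String.ofList e, String.ofList (PySem.Chars.join ['\n'] st.2.2))]
      else st.1
  | none => st.1

-- ===== PORT B =====
-- Source B's inner per-block loop: state = (event, data)
def sseScanBlock (block : List (List Char)) : Option (List Char) × List (List Char) :=
  block.foldl
    (fun st ln =>
      if PySem.Chars.startswith ln "event:".toList then
        (some (PySem.Chars.strip (ln.drop 6)), st.2)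
      else if PySem.Chars.startswith ln "data:".toList then
        (st.1, st.2 ++ [PySem.Chars.strip (ln.drop 5)])
      else st)
    (none, [])

-- Source B's 'if event: out.append(...)': the (possibly empty) contribution of one block
def sseEmit (block : List (List Char)) : List (String × String) :=
  match sseScanBlock block with
  | (some e, dat) =>
      if e ≠ [] then [(String.ofList e, String.ofList (PySem.Chars.join ['\n'] dat))] else []
  | (none, _) => []

def parse_sse_py_alt (text : String) : List (String × String) :=
  let lines := (PySem.Chars.splitOn text.toList "\n".toList).map sseRstripCR
  let p := lines.foldl
    (fun (st : List (List (List Char)) × List (List Char)) ln =>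
      if ln = [] then (st.1 ++ [st.2], []) else (st.1, st.2 ++ [ln]))
    ([], [])
  let blocks := p.1 ++ [p.2]
  blocks.foldl (fun out b => out ++ sseEmit b) []

-- ===== PRECONDITION & SPEC =====
def Spec_parse_sse_py (text : String) (out : List (String × String)) : Prop := out = parse_sse_py_alt text
instance (text : String) (out : List (String × String)) : Decidable (Spec_parse_sse_py text out) := by unfold Spec_parse_sse_py; infer_instance

-- ===== CLAIM (what is proved, stated in full; the proofs are below) =====
def Claim_equal_parse_sse_py : Prop := ∀ (text : String), Dom_parse_sse_py text → Spec_parse_sse_py text (parse_sse_py text)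

-- ===== LEMMAS AND PROOFS =====

-- A's step without the rstrip (the lines are pre-stripped)
def sseStepA' (st : List (String × String) × Option (List Char) × List (List Char))
    (line : List Char) : List (String × String) × Option (List Char) × List (List Char) :=
  if PySem.Chars.startswith line "event:".toList then
    (st.1, some (PySem.Chars.strip (line.drop 6)), st.2.2)
  else if PySem.Chars.startswith line "data:".toList then
    (st.1, st.2.1, st.2.2 ++ [PySem.Chars.strip (line.drop 5)])
  else if line = [] then
    (match st.2.1 with
     | some e =>
        if e ≠ [] then
          (st.1 ++ [(String.ofList e, String.ofList (PySem.Chars.join ['\n'] st.2.2))], none, [])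
        else (st.1, none, [])
     | none => (st.1, none, []))
  else st

-- A's end-of-loop flush
def sseFinish (st : List (String × String) × Option (List Char) × List (List Char)) :
    List (String × String) :=
  match st.2.1 with
  | some e =>
      if e ≠ [] then st.1 ++ [(String.ofList e, String.ofList (PySem.Chars.join ['\n'] st.2.2))]
      else st.1
  | none => st.1

-- recursive description of B's split-into-blocks fold
def sseSplitAcc (cur : List (List Char)) : List (List Char) → List (List (List Char))
  | [] => [cur]
  | l :: ls => if l = [] then cur :: sseSplitAcc [] ls else sseSplitAcc (cur ++ [l]) ls

lemma sseScanBlock_snoc (cur : List (List Char)) (l : List Char) :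
    sseScanBlock (cur ++ [l]) =
      (if PySem.Chars.startswith l "event:".toList then
        (some (PySem.Chars.strip (l.drop 6)), (sseScanBlock cur).2)
      else if PySem.Chars.startswith l "data:".toList then
        ((sseScanBlock cur).1, (sseScanBlock cur).2 ++ [PySem.Chars.strip (l.drop 5)])
      else sseScanBlock cur) := by
  simp only [sseScanBlock, List.foldl_append, List.foldl_cons, List.foldl_nil]

lemma sseFinish_base (evs : List (String × String)) (cur : List (List Char)) :
    sseFinish (evs, sseScanBlock cur) = evs ++ sseEmit cur := by
  unfold sseFinish sseEmit
  rcases h : sseScanBlock cur with ⟨e?, dat⟩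
  cases e? with
  | none => simp
  | some e => by_cases he : e = [] <;> simp [he]

lemma sseStepA'_empty (evs : List (String × String)) (cur : List (List Char)) :
    sseStepA' (evs, sseScanBlock cur) [] = (evs ++ sseEmit cur, none, []) := by
  unfold sseStepA' sseEmit
  rcases h : sseScanBlock cur with ⟨e?, dat⟩
  cases e? with
  | none => simp [PySem.Chars.startswith]
  | some e => by_cases he : e = [] <;> simp [PySem.Chars.startswith, he]

lemma sseStepA'_nonempty (evs : List (String × String)) (cur : List (List Char))
    (l : List Char) (hl : l ≠ []) :
    sseStepA' (evs, sseScanBlock cur) l = (evs, sseScanBlock (cur ++ [l])) := by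
  rw [sseScanBlock_snoc]
  unfold sseStepA'
  split_ifs <;> rfl

-- main invariant: A's loop + flush = concatenated per-block emissions
lemma sse_main (ls : List (List Char)) : ∀ (evs : List (String × String)) (cur : List (List Char)),
    sseFinish (ls.foldl sseStepA' (evs, sseScanBlock cur))
      = evs ++ ((sseSplitAcc cur ls).map sseEmit).flatten := by
  induction ls with
  | nil => intro evs cur; simpa [sseSplitAcc] using sseFinish_base evs cur
  | cons l ls ih =>
    intro evs cur
    by_cases hl : l = []
    · subst hl
      simp only [List.foldl_cons, sseStepA'_empty]
      have h0 : (none, ([] : List (List Char))) = sseScanBlock [] := rfl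
      rw [h0, ih (evs ++ sseEmit cur) []]
      simp [sseSplitAcc]
    · simp only [List.foldl_cons, sseStepA'_nonempty evs cur l hl]
      rw [ih evs (cur ++ [l])]
      simp [sseSplitAcc, hl]

-- B's split fold computes sseSplitAcc
lemma sse_split (ls : List (List Char)) : ∀ (bs : List (List (List Char))) (cur : List (List Char)),
    (ls.foldl
      (fun (st : List (List (List Char)) × List (List Char)) ln =>
        if ln = [] then (st.1 ++ [st.2], []) else (st.1, st.2 ++ [ln])) (bs, cur)).1
    ++ [(ls.foldl
      (fun (st : List (List (List Char)) × List (List Char)) ln =>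
        if ln = [] then (st.1 ++ [st.2], []) else (st.1, st.2 ++ [ln])) (bs, cur)).2]
    = bs ++ sseSplitAcc cur ls := by
  induction ls with
  | nil => intro bs cur; simp [sseSplitAcc]
  | cons l ls ih =>
    intro bs cur
    by_cases hl : l = []
    · subst hl
      simpa [sseSplitAcc, List.foldl_cons] using ih (bs ++ [cur]) []
    · simp only [List.foldl_cons, if_neg hl]
      rw [ih bs (cur ++ [l])]; simp [sseSplitAcc, hl]

-- B's outer output fold is flatten of the per-block emissions
lemma sse_outfold (blocks : List (List (List Char))) :
    ∀ (out : List (String × String)),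
    blocks.foldl (fun out b => out ++ sseEmit b) out = out ++ (blocks.map sseEmit).flatten := by
  induction blocks with
  | nil => intro out; simp
  | cons b bs ih => intro out; simp [ih, List.append_assoc]

-- ===== VERDICT (by name: the statement is the Claim_ definition above) =====
theorem parse_sse_py_spec : Claim_equal_parse_sse_py := by
  intro text _
  unfold Spec_parse_sse_py parse_sse_py parse_sse_py_alt
  have hmap : ∀ (ls : List (List Char)) (st : List (String × String) × Option (List Char) × List (List Char)),
      ls.foldl sseStepA st = (ls.map sseRstripCR).foldl sseStepA' st := by
    intro ls st
    rw [List.foldl_map]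
    rfl
  rw [hmap]
  set ls := (PySem.Chars.splitOn text.toList "\n".toList).map sseRstripCR with hls
  have h1 : (match (ls.foldl sseStepA' ([], none, [])).2.1 with
      | some e =>
          if e ≠ [] then (ls.foldl sseStepA' ([], none, [])).1
            ++ [(String.ofList e,
                 String.ofList (PySem.Chars.join ['\n'] (ls.foldl sseStepA' ([], none, [])).2.2))]
          else (ls.foldl sseStepA' ([], none, [])).1
      | none => (ls.foldl sseStepA' ([], none, [])).1)
      = sseFinish (ls.foldl sseStepA' ([], sseScanBlock [])) := rfl
  rw [h1, sse_main ls [] []]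
  rw [sse_outfold]
  have h2 := sse_split ls [] []
  simp only [List.nil_append] at h2 ⊢
  rw [h2]
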